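-- pv_equiv track=rewrite | github.com/MrBrantCode/unitest_baseline | mut_generate/mist_train_cf/cf_91124/solution.py | partition_numbers
-- ===== SOURCE A (Python) =====
-- import math
--
-- def is_prime(num):
--     if num < 2:
--         return False
--     for i in range(2, int(math.sqrt(num)) + 1):
--         if num % i == 0:
--             return False
--     return True
--
-- def partition_numbers(numbers):
--     odd_numbers = []
--     even_numbers = []
--     prime_numbers = []
--
--     for num in numbers:
--         if num % 2 == 0:
--             even_numbers.append(num)
--         else:
--             odd_numbers.append(num)
--
--         if is_prime(num):
--             prime_numbers.append(num)
--
--     return odd_numbers, even_numbers, prime_numbers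
-- ===== SOURCE B (Python) =====
-- def is_prime(num):
--     # 6k+-1 wheel trial division: after ruling out 2 and 3, any divisor up to
--     # sqrt(num) is of the form 6k-1 or 6k+1, so step d by 6 testing d and d+2.
--     if num < 4:
--         return num > 1
--     if num % 2 == 0 or num % 3 == 0:
--         return False
--     d = 5
--     while d * d <= num:
--         if num % d == 0 or num % (d + 2) == 0:
--             return False
--         d += 6
--     return True
--
-- def partition_numbers(numbers):
--     prime = {n: is_prime(n) for n in set(numbers)}
--     odd_numbers = [n for n in numbers if n % 2]
--     even_numbers = [n for n in numbers if not n % 2]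
--     prime_numbers = [n for n in numbers if prime[n]]
--     return odd_numbers, even_numbers, prime_numbers
-- ===== Notes on version B (the rewrite author's own statement) =====
-- stated objective: alternative
-- what changed: Primality switches from whole-range trial division to a 6k±1 wheel (testing only 2, 3 and candidates of form 6k±1 up to sqrt) and is computed once per distinct value via a hash table built over set(numbers); the partition itself becomes three independent filtered passes instead of one fused accumulating loop.
import Mathlib
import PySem

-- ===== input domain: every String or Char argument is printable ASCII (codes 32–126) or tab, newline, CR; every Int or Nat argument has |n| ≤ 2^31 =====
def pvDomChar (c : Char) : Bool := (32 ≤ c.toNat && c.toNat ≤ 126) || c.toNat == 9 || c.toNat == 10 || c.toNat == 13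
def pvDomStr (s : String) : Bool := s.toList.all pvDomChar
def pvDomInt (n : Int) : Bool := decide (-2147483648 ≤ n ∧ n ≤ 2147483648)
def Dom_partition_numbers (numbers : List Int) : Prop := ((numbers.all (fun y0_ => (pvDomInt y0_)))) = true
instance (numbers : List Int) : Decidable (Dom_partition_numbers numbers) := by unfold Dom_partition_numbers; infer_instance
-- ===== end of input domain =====

-- B: 6k±1-wheel trial division computed once per distinct value via a hash table,
-- and three independent filter passes instead of A's fused loop.

-- ===== PORT A =====
-- A's is_prime loop: return False on the first divisor found, True at the end of the range.
def isPrimeLoopA (num : Int) : List Int → Bool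
  | [] => true
  | i :: rest => if PySem.Int.mod num i == 0 then false else isPrimeLoopA num rest

-- int(math.sqrt(num)) equals the integer square root for 0 ≤ num ≤ 2^31 (float sqrt is exact enough there)
def isPrimeA (num : Int) : Bool :=
  if num < 2 then false
  else isPrimeLoopA num (PySem.List.pyRange 2 ((Nat.sqrt num.toNat : Int) + 1) 1)

def partition_numbers (numbers : List Int) : List Int × List Int × List Int :=
  numbers.foldl (fun acc num =>
    let acc1 := if PySem.Int.mod num 2 == 0 then (acc.1, acc.2.1 ++ [num], acc.2.2)
                else (acc.1 ++ [num], acc.2.1, acc.2.2)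
    if isPrimeA num then (acc1.1, acc1.2.1, acc1.2.2 ++ [num]) else acc1) ([], [], [])

-- ===== PORT B =====
-- while d * d <= num: …; d += 6   (terminates: d ≤ num while the guard holds, and d grows)
def wheelB (num d : Int) : Bool :=
  if h : d * d ≤ num then
    if PySem.Int.mod num d == 0 || PySem.Int.mod num (d + 2) == 0 then false
    else wheelB num (d + 6)
  else true
termination_by (num + 1 - d).toNat
decreasing_by
  have hd : d ≤ num := by by_cases h0 : d ≤ 0 <;> nlinarith
  omega

def isPrimeB (num : Int) : Bool :=
  if num < 4 then decide (1 < num)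
  else if PySem.Int.mod num 2 == 0 || PySem.Int.mod num 3 == 0 then false
  else wheelB num 5

-- {n: is_prime(n) for n in set(numbers)} — a Dict only looked up afterwards
def primeTableB (numbers : List Int) : PySem.Dict Int Bool :=
  (PySem.Set.ofList numbers).foldl (fun d n => d.insert n (isPrimeB n)) PySem.Dict.empty

def partition_numbers_alt (numbers : List Int) : List Int × List Int × List Int :=
  let table := primeTableB numbers
  (numbers.filter (fun n => !(PySem.Int.mod n 2 == 0)),
   numbers.filter (fun n => PySem.Int.mod n 2 == 0),
   -- prime[n]: the key is always present (built over set(numbers)), so the default is never read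
   numbers.filter (fun n => table.getD n false))

-- ===== PRECONDITION & SPEC =====
def Spec_partition_numbers (numbers : List Int) (out : List Int × List Int × List Int) : Prop := out = partition_numbers_alt numbers
instance (numbers : List Int) (out : List Int × List Int × List Int) : Decidable (Spec_partition_numbers numbers out) := by unfold Spec_partition_numbers; infer_instance

-- ===== CLAIM (what is proved, stated in full; the proofs are below) =====
def Claim_equal_partition_numbers : Prop := ∀ (numbers : List Int), Dom_partition_numbers numbers → Spec_partition_numbers numbers (partition_numbers numbers)

-- ===== LEMMAS AND PROOFS =====

theorem isPrimeLoopA_eq_all (num : Int) (l : List Int) :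
    isPrimeLoopA num l = l.all (fun i => !(PySem.Int.mod num i == 0)) := by
  induction l with
  | nil => rfl
  | cons i rest ih =>
    by_cases hd : PySem.Int.mod num i == 0 <;> simp [isPrimeLoopA, hd, ih]

theorem sq_le_iff (num i : Int) (hn : 0 ≤ num) (hi : 0 ≤ i) :
    i * i ≤ num ↔ i ≤ (Nat.sqrt num.toNat : Int) := by
  have e1 : i = (i.toNat : Int) := (Int.toNat_of_nonneg hi).symm
  have e2 : num = (num.toNat : Int) := (Int.toNat_of_nonneg hn).symm
  rw [e1, e2]
  simp only [Int.toNat_natCast]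
  exact_mod_cast Nat.le_sqrt.symm

theorem isPrimeA_iff (num : Int) :
    isPrimeA num = true ↔ 2 ≤ num ∧ ∀ i : Int, 2 ≤ i → i * i ≤ num → ¬ i ∣ num := by
  unfold isPrimeA
  by_cases h : num < 2
  · simp only [if_pos h, Bool.false_eq_true, false_iff]
    rintro ⟨h2, -⟩; omega
  · rw [if_neg h, isPrimeLoopA_eq_all, List.all_eq_true]
    constructor
    · intro H
      refine ⟨by omega, fun i h2 hsq => fun hdvd => ?_⟩
      have hmem : i ∈ PySem.List.pyRange 2 ((Nat.sqrt num.toNat : Int) + 1) 1 := by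
        rw [PySem.List.mem_pyRange_one]
        have := (sq_le_iff num i (by omega) (by omega)).mp hsq
        omega
      have := H i hmem
      rw [← PySem.Int.mod_eq_zero_iff_dvd] at hdvd
      simp [hdvd] at this
    · rintro ⟨-, H⟩ i hmem
      rw [PySem.List.mem_pyRange_one] at hmem
      have hsq : i * i ≤ num :=
        (sq_le_iff num i (by omega) (by omega)).mpr (by omega)
      have := H i (by omega) hsq
      rw [← PySem.Int.mod_eq_zero_iff_dvd] at this
      simpa using this

theorem wheelB_iff (num c : Int) (hc : 0 < c) :
    wheelB num c = true ↔
      ∀ k : Nat, (c + 6 * k) * (c + 6 * k) ≤ num →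
        ¬ (c + 6 * k) ∣ num ∧ ¬ (c + 6 * k + 2) ∣ num := by
  revert hc
  induction c using wheelB.induct num with
  | case1 d h hfound =>
    intro hc
    rw [wheelB, dif_pos h, if_pos hfound]
    simp only [Bool.false_eq_true, false_iff]
    intro H
    have h0 := H 0 (by push_cast; simpa using h)
    rcases Bool.or_eq_true_iff.mp hfound with hf | hf <;>
      rcases h0 with ⟨ha, hb⟩
    · exact ha (by push_cast; exact (PySem.Int.mod_eq_zero_iff_dvd _ _).mp (by simpa using hf))
    · exact hb (by push_cast; exact (PySem.Int.mod_eq_zero_iff_dvd _ _).mp (by simpa using hf))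
  | case2 d h hfound ih =>
    intro hd
    rw [wheelB, dif_pos h, if_neg hfound]
    rw [ih (by omega)]
    constructor
    · intro H k hk
      cases k with
      | zero =>
        push_cast at hk ⊢
        simp only [Bool.or_eq_true, beq_iff_eq] at hfound
        push Not at hfound
        constructor
        · intro hdvd
          exact hfound.1 ((PySem.Int.mod_eq_zero_iff_dvd _ _).mpr (by simpa using hdvd))
        · intro hdvd
          exact hfound.2 ((PySem.Int.mod_eq_zero_iff_dvd _ _).mpr (by simpa using hdvd))
      | succ k' =>
        have heq : d + 6 * ((k' + 1 : Nat) : Int) = d + 6 + 6 * (k' : Int) := by push_cast; ring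
        rw [heq] at hk ⊢
        exact H k' hk
    · intro H k hk
      have heq : d + 6 + 6 * (k : Int) = d + 6 * ((k + 1 : Nat) : Int) := by push_cast; ring
      rw [heq] at hk ⊢
      exact H (k + 1) hk
  | case3 d h =>
    intro hc
    rw [wheelB, dif_neg h]
    simp only [true_iff]
    intro k hk
    exfalso
    have hk0 : (0:Int) ≤ 6 * (k:Int) := by positivity
    nlinarith

theorem isPrimeB_iff (num : Int) :
    isPrimeB num = true ↔ 2 ≤ num ∧ ∀ i : Int, 2 ≤ i → i * i ≤ num → ¬ i ∣ num := by
  unfold isPrimeB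
  by_cases h4 : num < 4
  · rw [if_pos h4]
    constructor
    · intro h
      refine ⟨by simpa using h, fun i h2 hsq hdvd => ?_⟩
      nlinarith
    · rintro ⟨h2, -⟩
      simpa using (by omega : 1 < num)
  · rw [if_neg h4]
    by_cases h23 : (PySem.Int.mod num 2 == 0 || PySem.Int.mod num 3 == 0) = true
    · rw [if_pos h23]
      simp only [Bool.false_eq_true, false_iff]
      rintro ⟨-, H⟩
      rcases Bool.or_eq_true_iff.mp h23 with hf | hf
      · have hdvd : (2:Int) ∣ num := (PySem.Int.mod_eq_zero_iff_dvd _ _).mp (by simpa using hf)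
        exact H 2 (by omega) (by omega) hdvd
      · have hdvd : (3:Int) ∣ num := (PySem.Int.mod_eq_zero_iff_dvd _ _).mp (by simpa using hf)
        have h9 : 9 ≤ num := by
          by_cases h2 : (2:Int) ∣ num
          · exfalso; exact H 2 (by omega) (by omega) h2
          · omega
        exact H 3 (by omega) (by omega) hdvd
    · rw [if_neg h23]
      simp only [Bool.or_eq_true, beq_iff_eq] at h23
      push Not at h23
      have h2 : ¬ (2:Int) ∣ num := fun hd =>
        h23.1 ((PySem.Int.mod_eq_zero_iff_dvd _ _).mpr hd)
      have h3 : ¬ (3:Int) ∣ num := fun hd =>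
        h23.2 ((PySem.Int.mod_eq_zero_iff_dvd _ _).mpr hd)
      rw [wheelB_iff num 5 (by norm_num)]
      constructor
      · intro W
        refine ⟨by omega, fun i hi2 hsq hdvd => ?_⟩
        have hi2' : ¬ (2:Int) ∣ i := fun hd => h2 (hd.trans hdvd)
        have hi3' : ¬ (3:Int) ∣ i := fun hd => h3 (hd.trans hdvd)
        have hi5 : 5 ≤ i := by omega
        by_cases hm : i % 6 = 5
        · obtain ⟨k, hk, hk0⟩ : ∃ k : Int, i = 5 + 6 * k ∧ 0 ≤ k := ⟨(i - 5) / 6, by omega, by omega⟩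
          have := W k.toNat (by rw [Int.toNat_of_nonneg hk0, ← hk]; exact hsq)
          rw [Int.toNat_of_nonneg hk0, ← hk] at this
          exact this.1 hdvd
        · have hm1 : i % 6 = 1 := by omega
          have hi7 : 7 ≤ i := by omega
          obtain ⟨k, hk, hk0⟩ : ∃ k : Int, i - 2 = 5 + 6 * k ∧ 0 ≤ k := ⟨(i - 7) / 6, by omega, by omega⟩
          have hesq : (i - 2) * (i - 2) ≤ num := by nlinarith
          have := W k.toNat (by rw [Int.toNat_of_nonneg hk0, ← hk]; exact hesq)
          rw [Int.toNat_of_nonneg hk0, ← hk] at this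
          have h2' := this.2
          have he : i - 2 + 2 = i := by ring
          rw [he] at h2'
          exact h2' hdvd
      · rintro ⟨-, H⟩ k hk
        set e : Int := 5 + 6 * (k:Int) with he
        have hek : (0:Int) ≤ (k:Int) := by positivity
        have he5 : 5 ≤ e := by omega
        constructor
        · exact fun hdvd => H e (by omega) hk hdvd
        · intro hdvd
          obtain ⟨m, hm⟩ := hdvd
          have hnum : 25 ≤ num := by nlinarith
          have hm1 : 2 ≤ m := by nlinarith
          by_cases hbig : (e + 2) * (e + 2) ≤ num
          · exact H (e + 2) (by omega) hbig ⟨m, hm⟩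
          · have hmlt : m < e + 2 := by nlinarith
            have hmsq : m * m ≤ num := by nlinarith
            exact H m hm1 hmsq ⟨e + 2, by linarith [hm]; ⟩

theorem isPrime_eq (num : Int) : isPrimeA num = isPrimeB num := by
  rw [Bool.eq_iff_iff, isPrimeA_iff, isPrimeB_iff]

theorem getD_foldl_insert_prime (s : List Int) (d : PySem.Dict Int Bool) (n : Int) :
    (s.foldl (fun d x => d.insert x (isPrimeB x)) d).getD n false
      = if n ∈ s then isPrimeB n else d.getD n false := by
  induction s generalizing d with
  | nil => simp
  | cons x s ih =>
    rw [List.foldl_cons, ih, PySem.Dict.getD_insert]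
    by_cases hx : n = x
    · subst hx
      by_cases hs : n ∈ s <;> simp [hs]
    · by_cases hs : n ∈ s <;> simp [hs, hx, List.mem_cons]

theorem table_getD (numbers : List Int) (n : Int) (hn : n ∈ numbers) :
    (primeTableB numbers).getD n false = isPrimeB n := by
  unfold primeTableB
  rw [getD_foldl_insert_prime]
  simp [PySem.Set.mem_ofList, hn]

theorem foldl_partition (l : List Int) (acc : List Int × List Int × List Int) :
    l.foldl (fun acc num =>
      let acc1 := if PySem.Int.mod num 2 == 0 then (acc.1, acc.2.1 ++ [num], acc.2.2)
                  else (acc.1 ++ [num], acc.2.1, acc.2.2)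
      if isPrimeA num then (acc1.1, acc1.2.1, acc1.2.2 ++ [num]) else acc1) acc
    = (acc.1 ++ l.filter (fun n => !(PySem.Int.mod n 2 == 0)),
       acc.2.1 ++ l.filter (fun n => PySem.Int.mod n 2 == 0),
       acc.2.2 ++ l.filter (fun n => isPrimeA n)) := by
  induction l generalizing acc with
  | nil => simp
  | cons n rest ih =>
    rw [List.foldl_cons, ih]
    simp only [List.filter_cons]
    cases h2 : PySem.Int.mod n 2 == 0 <;> cases hp : isPrimeA n <;>
      simp [List.append_assoc]

theorem partition_numbers_spec : Claim_equal_partition_numbers := by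
  intro numbers _
  unfold Spec_partition_numbers partition_numbers partition_numbers_alt
  rw [foldl_partition]
  simp only [List.nil_append]
  refine congrArg _ (congrArg _ ?_)
  refine List.filter_congr (fun n hn => ?_)
  rw [isPrime_eq, table_getD numbers n hn]
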